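-- pv_equiv track=rewrite | github.com/Aspenini/bf2x | bf2x.py | desugar
-- ===== SOURCE A (Python) =====
-- def desugar(tokens):
--     out = []; i = 0
--     while i < len(tokens):
--         if i + 2 < len(tokens) and tokens[i] == ('[',1) and tokens[i+1] == ('-',1) and tokens[i+2] == (']',1):
--             out.append(('CLR',1)); i += 3
--         else:
--             out.append(tokens[i]); i += 1
--     return out
-- ===== SOURCE B (Python) =====
-- def desugar(tokens):
--     out = []
--     for tok in tokens:
--         out.append(tok)
--         if len(out) >= 3 and out[-3:] == [('[', 1), ('-', 1), (']', 1)]: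
--             del out[-3:]
--             out.append(('CLR', 1))
--     return out
-- ===== Notes on version B (the rewrite author's own statement) =====
-- stated objective: alternative
-- what changed: Replaces the index-based lookahead scan with a single stack-style pass that appends each token and collapses the output's tail whenever its last three tokens form [-], eliminating the explicit window index.
import Mathlib
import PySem

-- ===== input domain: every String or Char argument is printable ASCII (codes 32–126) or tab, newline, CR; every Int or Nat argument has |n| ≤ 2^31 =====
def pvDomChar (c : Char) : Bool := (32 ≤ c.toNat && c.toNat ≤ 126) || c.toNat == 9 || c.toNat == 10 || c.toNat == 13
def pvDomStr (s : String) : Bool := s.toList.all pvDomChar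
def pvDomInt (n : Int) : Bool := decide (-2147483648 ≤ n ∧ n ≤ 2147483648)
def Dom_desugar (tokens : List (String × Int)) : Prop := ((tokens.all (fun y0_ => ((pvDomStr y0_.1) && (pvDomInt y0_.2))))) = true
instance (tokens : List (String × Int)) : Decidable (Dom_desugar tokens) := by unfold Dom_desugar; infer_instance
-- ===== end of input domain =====

-- B replaces A's index-and-lookahead scan with a stack-style fold that collapses the output tail; alternative decomposition, same cost.


-- ===== PORT A =====
-- A's while-loop: index i scans tokens, looking ahead two positions for the ('[',1) ('-',1) (']',1) pattern.
def desugarGo (tokens : List (String × Int)) (out : List (String × Int)) (i : Nat) :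
    List (String × Int) :=
  if h : i < tokens.length then
    if i + 2 < tokens.length ∧ tokens.getD i ("", 0) = ("[", 1) ∧
        tokens.getD (i+1) ("", 0) = ("-", 1) ∧ tokens.getD (i+2) ("", 0) = ("]", 1) then
      desugarGo tokens (out ++ [("CLR", 1)]) (i + 3)
    else
      desugarGo tokens (out ++ [tokens.getD i ("", 0)]) (i + 1)
  else out
termination_by tokens.length - i

def desugar (tokens : List (String × Int)) : List (String × Int) :=
  desugarGo tokens [] 0

-- ===== PORT B =====
-- B's loop body: append tok, then collapse the last three output tokens if they are the pattern.
def desugarStep (out : List (String × Int)) (tok : String × Int) : List (String × Int) :=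
  let o := out ++ [tok]
  if 3 ≤ o.length ∧ o.drop (o.length - 3) = [("[", 1), ("-", 1), ("]", 1)] then
    o.take (o.length - 3) ++ [("CLR", 1)]
  else o

def desugar_alt (tokens : List (String × Int)) : List (String × Int) :=
  tokens.foldl desugarStep []

-- ===== PRECONDITION & SPEC =====
def Spec_desugar (tokens : List (String × Int)) (out : List (String × Int)) : Prop := out = desugar_alt tokens
instance (tokens : List (String × Int)) (out : List (String × Int)) : Decidable (Spec_desugar tokens out) := by unfold Spec_desugar; infer_instance

-- ===== CLAIM (what is proved, stated in full; the proofs are below) =====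
def Claim_equal_desugar : Prop := ∀ (tokens : List (String × Int)), Dom_desugar tokens → Spec_desugar tokens (desugar tokens)

-- ===== LEMMAS AND PROOFS =====

-- The common reference: leftmost non-overlapping replacement of the pattern by ('CLR',1).
def specD : List (String × Int) → List (String × Int)
  | a :: b :: c :: rest =>
    if a = ("[", (1:Int)) ∧ b = ("-", (1:Int)) ∧ c = ("]", (1:Int)) then
      ("CLR", 1) :: specD rest
    else a :: specD (b :: c :: rest)
  | l => l

-- ---- A-side: desugarGo computes specD of the remaining suffix ----
lemma desugarGo_eq_spec (tokens : List (String × Int)) :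
    ∀ n i out, tokens.length - i ≤ n →
      desugarGo tokens out i = out ++ specD (tokens.drop i) := by
  intro n
  induction n with
  | zero =>
    intro i out h
    have hge : tokens.length ≤ i := by omega
    rw [desugarGo]
    simp [Nat.not_lt.mpr hge, List.drop_of_length_le hge, specD]
  | succ n ih =>
    intro i out h
    by_cases hi : i < tokens.length
    · have hdrop : tokens.drop i = tokens[i] :: tokens.drop (i+1) :=
        List.drop_eq_getElem_cons hi
      by_cases hc : i + 2 < tokens.length ∧ tokens.getD i ("", 0) = ("[", 1) ∧
          tokens.getD (i+1) ("", 0) = ("-", 1) ∧ tokens.getD (i+2) ("", 0) = ("]", 1)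
      · rw [desugarGo, dif_pos hi, if_pos hc]
        obtain ⟨h2, ha, hb, hcv⟩ := hc
        have h1 : i + 1 < tokens.length := by omega
        have hdrop1 : tokens.drop (i+1) = tokens[i+1] :: tokens.drop (i+2) :=
          List.drop_eq_getElem_cons h1
        have hdrop2 : tokens.drop (i+2) = tokens[i+2] :: tokens.drop (i+3) :=
          List.drop_eq_getElem_cons h2
        have ea : tokens[i] = ("[", (1:Int)) := by
          rwa [List.getD_eq_getElem _ _ hi] at ha
        have eb : tokens[i+1] = ("-", (1:Int)) := by
          rwa [List.getD_eq_getElem _ _ h1] at hb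
        have ec : tokens[i+2] = ("]", (1:Int)) := by
          rwa [List.getD_eq_getElem _ _ h2] at hcv
        rw [ih (i+3) _ (by omega), hdrop, hdrop1, hdrop2, ea, eb, ec]
        simp [specD]
      · rw [desugarGo, dif_pos hi, if_neg hc]
        rw [ih (i+1) _ (by omega), hdrop]
        have hiv : tokens.getD i ("", 0) = tokens[i] := List.getD_eq_getElem _ _ hi
        rw [hiv]
        -- show tokens[i] :: specD (drop (i+1)) = specD (tokens[i] :: drop (i+1))
        rcases hd : tokens.drop (i+1) with _ | ⟨b, tl⟩
        · simp [specD]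
        · rcases tl with _ | ⟨c, tl2⟩
          · simp [specD]
          · have hne : ¬ (tokens[i] = ("[", (1:Int)) ∧ b = ("-", (1:Int)) ∧ c = ("]", (1:Int))) := by
              rintro ⟨ea, eb, ec⟩
              apply hc
              have h1 : i + 1 < tokens.length := by
                by_contra hle
                have hx := List.drop_of_length_le (l := tokens) (i := i+1) (by omega)
                rw [hx] at hd; exact absurd hd (by simp)
              have h2 : i + 2 < tokens.length := by
                by_contra hle
                have hdd : tokens.drop (i+1) = [tokens[i+1]] := by
                  rw [List.drop_eq_getElem_cons h1,
                    List.drop_of_length_le (l := tokens) (i := i+2) (by omega)]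
                rw [hdd] at hd; exact absurd hd (by simp)
              have h' := List.drop_eq_getElem_cons h1 (l := tokens)
              rw [hd] at h'
              injection h' with e1 e2
              have h'' := List.drop_eq_getElem_cons h2 (l := tokens)
              rw [← e2] at h''
              injection h'' with e3 _
              refine ⟨h2, ?_, ?_, ?_⟩
              · rw [List.getD_eq_getElem _ _ hi, ea]
              · rw [List.getD_eq_getElem _ _ h1, ← e1, eb]
              · rw [List.getD_eq_getElem _ _ h2, ← e3, ec]
            simp [specD, hne]
    · have hge : tokens.length ≤ i := by omega
      rw [desugarGo]
      simp [hi, List.drop_of_length_le hge, specD]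

-- ---- B-side: characterise one step ----
lemma step_collapse (p : List (String × Int)) :
    desugarStep (p ++ [("[", 1), ("-", 1)]) ("]", 1) = p ++ [("CLR", 1)] := by
  unfold desugarStep
  have e : p ++ [("[", (1:Int)), ("-", 1)] ++ [("]", 1)]
      = p ++ [("[", 1), ("-", 1), ("]", 1)] := by simp
  simp only [e]
  have hl : (p ++ [("[", (1:Int)), ("-", 1), ("]", 1)]).length = p.length + 3 := by simp
  rw [hl]
  simp

lemma step_keep (out : List (String × Int)) (tok : String × Int)
    (h : ¬ (tok = ("]", 1) ∧ ∃ p, out = p ++ [("[", 1), ("-", 1)])) :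
    desugarStep out tok = out ++ [tok] := by
  unfold desugarStep
  simp only []
  split_ifs with hc
  · exfalso
    obtain ⟨hlen, hdrop⟩ := hc
    set o := out ++ [tok] with ho
    have hsplit : o = o.take (o.length - 3) ++ [("[", 1), ("-", 1), ("]", 1)] := by
      conv_lhs => rw [← List.take_append_drop (o.length - 3) o]
      rw [hdrop]
    have hlen' : out.length + 1 = o.length := by simp [ho]
    -- from out ++ [tok] = q ++ [a,b,c] with lengths, read off tok and out's tail
    set q := o.take (o.length - 3) with hq
    have hql : q.length = o.length - 3 := by
      simp [hq]
    have : out ++ [tok] = (q ++ [("[", 1), ("-", 1)]) ++ [("]", 1)] := by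
      rw [← ho]; rw [hsplit]; simp
    have h2 := List.append_inj' this (by simp)
    exact h ⟨by simpa using h2.2, q, h2.1⟩
  · rfl

-- tail-shape invariant: out never ends in a proper prefix of the pattern that the
-- upcoming input would complete
def Safe (out l : List (String × Int)) : Prop :=
  (∀ p, out = p ++ [("[", 1)] → ∀ r, l ≠ ("-", 1) :: ("]", 1) :: r) ∧
  (∀ p, out = p ++ [("[", 1), ("-", 1)] → ∀ r, l ≠ ("]", 1) :: r)

lemma foldl_step_spec : ∀ n (l : List (String × Int)), l.length ≤ n →
    ∀ out, Safe out l → l.foldl desugarStep out = out ++ specD l := by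
  intro n
  induction n with
  | zero =>
    intro l hl out _
    have : l = [] := List.eq_nil_of_length_eq_zero (by omega)
    subst this; simp [specD]
  | succ n ih =>
    intro l hl out hs
    match l with
    | [] => simp [specD]
    | a :: b :: c :: rest =>
      by_cases hp : a = ("[", (1:Int)) ∧ b = ("-", (1:Int)) ∧ c = ("]", (1:Int))
      · obtain ⟨ea, eb, ec⟩ := hp
        subst ea; subst eb; subst ec
        have s1 : desugarStep out ("[", 1) = out ++ [("[", 1)] := by
          apply step_keep; rintro ⟨h1, -⟩; exact absurd h1 (by decide)
        have s2 : desugarStep (out ++ [("[", 1)]) ("-", 1) = out ++ [("[", 1), ("-", 1)] := by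
          rw [step_keep _ _ (by rintro ⟨h1, -⟩; exact absurd h1 (by decide))]; simp
        have s3 : desugarStep (out ++ [("[", 1), ("-", 1)]) ("]", 1) = out ++ [("CLR", 1)] :=
          step_collapse out
        simp only [List.foldl_cons]
        rw [s1, s2, s3, ih rest (by simp at hl ⊢; omega)]
        · simp [specD]
        · refine ⟨?_, ?_⟩
          · intro p hpe r hr
            have hx := congrArg List.getLast? hpe
            simp at hx
          · intro p hpe r hr
            have hx := congrArg List.getLast? hpe
            simp at hx
      · -- first token appended without collapse
        have s1 : desugarStep out a = out ++ [a] := by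
          apply step_keep
          rintro ⟨ha, p, hpe⟩
          exact (hs.2 p hpe (b :: c :: rest)) (by rw [ha])
        rw [List.foldl_cons, s1, ih (b :: c :: rest) (by simp at hl ⊢; omega)]
        · simp [specD, hp]
        · refine ⟨?_, ?_⟩
          · intro p hpe r hr
            have ha : a = ("[", (1:Int)) := by
              have hx := congrArg List.getLast? hpe; simpa using hx
            obtain ⟨eb, ec⟩ : b = ("-", (1:Int)) ∧ c = ("]", (1:Int)) := by
              injection hr with e1 e2; injection e2 with e3 _
              exact ⟨e1, e3⟩
            exact hp ⟨ha, eb, ec⟩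
          · intro p hpe r hr
            have ha : a = ("-", (1:Int)) := by
              have hx := congrArg List.getLast? hpe; simpa using hx
            have hout : out = p ++ [("[", 1)] := by
              have hx : out ++ [a] = (p ++ [("[", (1:Int))]) ++ [("-", 1)] := by
                rw [hpe]; simp
              exact (List.append_inj' hx (by simp)).1
            have eb : b = ("]", (1:Int)) := by injection hr
            exact (hs.1 p hout (c :: rest)) (by rw [ha, eb])
    | [a] =>
      have s1 : desugarStep out a = out ++ [a] := by
        apply step_keep
        rintro ⟨ha, p, hpe⟩
        exact (hs.2 p hpe []) (by rw [ha])
      simp only [List.foldl_cons, List.foldl_nil]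
      rw [s1]; simp [specD]
    | [a, b] =>
      have s1 : desugarStep out a = out ++ [a] := by
        apply step_keep
        rintro ⟨ha, p, hpe⟩
        exact (hs.2 p hpe [b]) (by rw [ha])
      have s2 : desugarStep (out ++ [a]) b = out ++ [a, b] := by
        rw [step_keep]
        · simp
        · rintro ⟨hb, p, hpe⟩
          have ha : a = ("-", (1:Int)) := by
            have hx := congrArg List.getLast? hpe; simpa using hx
          have hout : out = p ++ [("[", 1)] := by
            have hx : out ++ [a] = (p ++ [("[", (1:Int))]) ++ [("-", 1)] := by
              rw [hpe]; simp
            exact (List.append_inj' hx (by simp)).1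
          exact (hs.1 p hout []) (by rw [ha, hb])
      simp only [List.foldl_cons, List.foldl_nil]
      rw [s1, s2]; simp [specD]

lemma desugar_eq_spec (tokens : List (String × Int)) : desugar tokens = specD tokens := by
  unfold desugar
  rw [desugarGo_eq_spec tokens tokens.length 0 [] (by omega)]
  simp

lemma desugar_alt_eq_spec (tokens : List (String × Int)) : desugar_alt tokens = specD tokens := by
  unfold desugar_alt
  rw [foldl_step_spec tokens.length tokens le_rfl []
    ⟨by intro p hp; simp at hp, by intro p hp; simp at hp⟩]
  simp

-- ===== VERDICT (by name: the statement is the Claim_ definition above) =====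
theorem desugar_spec : Claim_equal_desugar := by
  intro tokens _
  unfold Spec_desugar
  rw [desugar_eq_spec, desugar_alt_eq_spec]
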